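-- pv_equiv track=rewrite | github.com/from-import/CCD_Smart_Car | CCD_Tool.py | detect_obstacle
-- ===== SOURCE A (Python) =====
-- def detect_obstacle(ccd_buf, obstacle_threshold = 10):
--     obstacle_detected = 0
--     black_count = 0
--
--     for pixel in ccd_buf:
--         if pixel == 1:
--             black_count += 1
--         else:
--             if black_count >= obstacle_threshold:
--                 obstacle_detected = 1
--                 break
--             black_count = 0
--
--     if black_count >= obstacle_threshold:
--         obstacle_detected = 1
--
--     return obstacle_detected
-- ===== SOURCE B (Python) =====
-- def detect_obstacle(ccd_buf, obstacle_threshold=10):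
--     longest = 0
--     start = 0
--     while start < len(ccd_buf):
--         run = _ones_from(ccd_buf, start)
--         longest = max(longest, run)
--         start += run + 1
--     return 1 if longest >= obstacle_threshold else 0
--
--
-- def _ones_from(buf, start):
--     # length of the run of 1-pixels beginning at index start
--     j = start
--     while j < len(buf) and buf[j] == 1:
--         j += 1
--     return j - start
-- ===== Notes on version B (the rewrite author's own statement) =====
-- stated objective: alternative
-- what changed: Replaces A's stateful pixel-by-pixel counter with early break and flag variable by a run-decomposition: an index-jumping scan measures each maximal run of 1-pixels, keeps the longest, and compares it to the threshold once at the end.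
import Mathlib
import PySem

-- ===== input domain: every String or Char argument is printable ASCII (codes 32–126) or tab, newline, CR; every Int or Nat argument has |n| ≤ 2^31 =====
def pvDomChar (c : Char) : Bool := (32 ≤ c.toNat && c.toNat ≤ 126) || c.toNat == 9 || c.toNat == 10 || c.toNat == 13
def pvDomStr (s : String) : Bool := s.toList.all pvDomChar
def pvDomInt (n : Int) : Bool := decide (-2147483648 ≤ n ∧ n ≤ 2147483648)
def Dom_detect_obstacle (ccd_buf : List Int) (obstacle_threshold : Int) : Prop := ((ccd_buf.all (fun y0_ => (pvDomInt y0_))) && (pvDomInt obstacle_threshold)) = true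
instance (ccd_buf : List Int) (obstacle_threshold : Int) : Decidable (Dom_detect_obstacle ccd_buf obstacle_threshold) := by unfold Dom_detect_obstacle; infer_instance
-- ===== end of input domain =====

-- B replaces A's stateful counter loop with early break by a recursive
-- longest-run-of-ones decomposition compared to the threshold once at the end (alternative, same cost).


-- ===== PORT A =====
-- A's for-loop over the pixels with state black_count; a `break` immediately
-- determines the returned value 1 (the final `black_count >= t` re-check after a
-- break cannot change it), and the trailing check is the [] case.
def detect_obstacle_loopA : List Int → Int → Int → Int
  | [], black_count, t => if black_count ≥ t then 1 else 0
  | pixel :: rest, black_count, t =>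
      if pixel = 1 then detect_obstacle_loopA rest (black_count + 1) t
      else if black_count ≥ t then 1
      else detect_obstacle_loopA rest 0 t

def detect_obstacle (ccd_buf : List Int) (obstacle_threshold : Int) : Int :=
  detect_obstacle_loopA ccd_buf 0 obstacle_threshold

-- ===== PORT B =====
-- inner while of `_ones_from`: advance j while j < len(buf) and buf[j] == 1 (j stays in range, so getD is exact)
def onesFromLoop (buf : List Int) (j : Nat) : Nat :=
  if h : j < buf.length ∧ buf.getD j 0 = 1 then onesFromLoop buf (j + 1) else j
  termination_by buf.length - j
  decreasing_by omega

-- `_ones_from(buf, start)` = final j minus start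
def ones_from (buf : List Int) (start : Nat) : Nat := onesFromLoop buf start - start

-- outer while of B: measure the run at `start`, keep the longest, jump past the run
def detect_obstacle_altLoop (buf : List Int) (start longest : Nat) : Nat :=
  if h : start < buf.length then
    let run := ones_from buf start
    detect_obstacle_altLoop buf (start + run + 1) (max longest run)
  else longest
  termination_by buf.length - start
  decreasing_by omega

def detect_obstacle_alt (ccd_buf : List Int) (obstacle_threshold : Int) : Int :=
  if (detect_obstacle_altLoop ccd_buf 0 0 : Int) ≥ obstacle_threshold then 1 else 0

-- ===== PRECONDITION & SPEC =====
def Spec_detect_obstacle (ccd_buf : List Int) (obstacle_threshold : Int) (out : Int) : Prop := out = detect_obstacle_alt ccd_buf obstacle_threshold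
instance (ccd_buf : List Int) (obstacle_threshold : Int) (out : Int) : Decidable (Spec_detect_obstacle ccd_buf obstacle_threshold out) := by unfold Spec_detect_obstacle; infer_instance

-- ===== CLAIM (what is proved, stated in full; the proofs are below) =====
def Claim_equal_detect_obstacle : Prop := ∀ (ccd_buf : List Int) (obstacle_threshold : Int), Dom_detect_obstacle ccd_buf obstacle_threshold → Spec_detect_obstacle ccd_buf obstacle_threshold (detect_obstacle ccd_buf obstacle_threshold)

-- ===== LEMMAS AND PROOFS =====
-- proof-side helpers: runs seen as a recursive decomposition
def leadingOnes : List Int → Nat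
  | [] => 0
  | x :: xs => if x = 1 then 1 + leadingOnes xs else 0

def maxRunRec : List Int → Nat
  | [] => 0
  | x :: xs =>
      let run := leadingOnes (x :: xs)
      max run (maxRunRec ((x :: xs).drop (run + 1)))
  termination_by l => l.length
  decreasing_by simp

theorem maxRunRec_eq (l : List Int) :
    maxRunRec l = max (leadingOnes l) (maxRunRec (l.drop (leadingOnes l + 1))) := by
  cases l with
  | nil => simp [maxRunRec, leadingOnes]
  | cons x xs => simp only [maxRunRec]

theorem loopA_eq (t : Int) (buf : List Int) : ∀ (c : Int), 0 ≤ c →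
    detect_obstacle_loopA buf c t =
      if c + (leadingOnes buf : Int) ≥ t ∨ (maxRunRec (buf.drop (leadingOnes buf + 1)) : Int) ≥ t
      then 1 else 0 := by
  induction buf with
  | nil =>
      intro c hc
      simp only [detect_obstacle_loopA, leadingOnes, List.drop_nil, maxRunRec]
      push_cast
      split_ifs <;> omega
  | cons p rest ih =>
      intro c hc
      by_cases hp : p = 1
      · have h1 : leadingOnes (p :: rest) = 1 + leadingOnes rest := by
          simp [leadingOnes, hp]
        have h2 : List.drop (1 + leadingOnes rest + 1) (p :: rest)
            = List.drop (leadingOnes rest + 1) rest := by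
          have h3 : 1 + leadingOnes rest + 1 = (leadingOnes rest + 1) + 1 := by omega
          rw [h3, List.drop_succ_cons]
        rw [show detect_obstacle_loopA (p :: rest) c t = detect_obstacle_loopA rest (c + 1) t
              from by simp [detect_obstacle_loopA, hp]]
        rw [ih (c + 1) (by omega), h1, h2]
        have h4 : (((1 + leadingOnes rest : Nat)) : Int) = 1 + (leadingOnes rest : Int) := by
          push_cast; ring
        rw [h4]
        split_ifs <;> omega
      · have h1 : leadingOnes (p :: rest) = 0 := by simp [leadingOnes, hp]
        rw [show detect_obstacle_loopA (p :: rest) c t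
              = (if c ≥ t then 1 else detect_obstacle_loopA rest 0 t)
              from by simp [detect_obstacle_loopA, hp]]
        rw [ih 0 le_rfl, h1]
        have h2 : List.drop (0 + 1) (p :: rest) = rest := by simp
        rw [h2]
        have hm := maxRunRec_eq rest
        split_ifs <;> omega


theorem onesFromLoop_eq (buf : List Int) : ∀ j : Nat, onesFromLoop buf j = j + leadingOnes (buf.drop j) := by
  intro j
  induction hd : buf.length - j using Nat.strong_induction_on generalizing j with
  | _ d ih =>
    by_cases h : j < buf.length
    · have hdrop : buf.drop j = buf[j] :: buf.drop (j + 1) := List.drop_eq_getElem_cons h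
      have hg : buf.getD j 0 = buf[j] := List.getD_eq_getElem buf 0 h
      by_cases h1 : buf[j] = 1
      · rw [onesFromLoop]
        rw [dif_pos ⟨h, by rw [hg]; exact h1⟩]
        rw [ih (buf.length - (j + 1)) (by omega) (j + 1) rfl]
        rw [hdrop]
        simp [leadingOnes, h1]
        omega
      · rw [onesFromLoop]
        rw [dif_neg (by rw [hg]; tauto)]
        rw [hdrop]
        simp [leadingOnes, h1]
    · have hdrop : buf.drop j = [] := List.drop_eq_nil_of_le (by omega)
      rw [onesFromLoop, dif_neg (by tauto), hdrop]
      simp [leadingOnes]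

theorem ones_from_eq (buf : List Int) (start : Nat) :
    ones_from buf start = leadingOnes (buf.drop start) := by
  unfold ones_from
  rw [onesFromLoop_eq]
  omega

theorem altLoop_eq (buf : List Int) : ∀ (start longest : Nat),
    detect_obstacle_altLoop buf start longest = max longest (maxRunRec (buf.drop start)) := by
  intro start longest
  induction hd : buf.length - start using Nat.strong_induction_on generalizing start longest with
  | _ d ih =>
    by_cases h : start < buf.length
    · rw [detect_obstacle_altLoop, dif_pos h]
      have hrun : ones_from buf start = leadingOnes (buf.drop start) := ones_from_eq buf start
      rw [ih (buf.length - (start + ones_from buf start + 1)) (by omega) _ _ rfl]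
      have hdd : List.drop (ones_from buf start + 1) (buf.drop start)
          = buf.drop (start + ones_from buf start + 1) := by
        rw [List.drop_drop]
        congr 1
      have hne : buf.drop start ≠ [] := by
        intro hnil
        have := congrArg List.length hnil
        simp at this
        omega
      have hmr : maxRunRec (buf.drop start)
          = max (leadingOnes (buf.drop start)) (maxRunRec (buf.drop (start + ones_from buf start + 1))) := by
        rw [maxRunRec_eq (buf.drop start), ← hrun, hdd]
      rw [hmr, hrun]
      omega
    · rw [detect_obstacle_altLoop, dif_neg h]
      rw [List.drop_eq_nil_of_le (by omega)]
      simp [maxRunRec]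

-- ===== VERDICT (by name: the statement is the Claim_ definition above) =====
theorem detect_obstacle_spec : Claim_equal_detect_obstacle := by
  intro ccd_buf t _
  unfold Spec_detect_obstacle detect_obstacle detect_obstacle_alt
  rw [loopA_eq t ccd_buf 0 le_rfl, altLoop_eq ccd_buf 0 0]
  simp only [List.drop_zero]
  have hm := maxRunRec_eq ccd_buf
  push_cast
  split_ifs <;> omega
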